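-- pv_equiv track=rewrite | github.com/twang15/K562-Analysis | code/Seqtailor/SeqTailor_DNA_VCF_neighborhood_multiplication.py | output_seq_forward_cartesian_product_sets
-- ===== SOURCE A (Python) =====
-- def output_seq_forward_cartesian_product_sets(current_data_variant_neigbors_list, current_data_variant_neigbors_dict):
--     products = [ [] ]
--
--     for each_variant in current_data_variant_neigbors_list:
--         temp_products = []
--         for product in products:
--             for alt in current_data_variant_neigbors_dict[each_variant]:
--                 temp_products.append(product + [alt])
--
--         products = temp_products
--
--     return products
-- ===== SOURCE B (Python) =====
-- def output_seq_forward_cartesian_product_sets(current_data_variant_neigbors_list, current_data_variant_neigbors_dict):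
--     # Mixed-radix index decoding: combination i is obtained by repeatedly
--     # taking i mod/div the size of each neighbor set, last variant fastest.
--     neighbor_lists = [current_data_variant_neigbors_dict[v] for v in current_data_variant_neigbors_list]
--     total = 1
--     for nl in neighbor_lists:
--         total *= len(nl)
--     result = []
--     for i in range(total):
--         combo = []
--         rem = i
--         for nl in reversed(neighbor_lists):
--             combo.append(nl[rem % len(nl)])
--             rem //= len(nl)
--         combo.reverse()
--         result.append(combo)
--     return result
-- ===== Notes on version B (the rewrite author's own statement) =====
-- stated objective: alternative
-- what changed: Replaces A's incremental accumulator growth (rebuilding the whole partial-product list per variant) by computing the total count of combinations and decoding each output index i directly as a mixed-radix number over the neighbor-set sizes.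
-- outside the precondition, e.g. on output_seq_forward_cartesian_product_sets(['a', 'b'], {'a': []}): A returns [], B raises KeyError
import Mathlib
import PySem

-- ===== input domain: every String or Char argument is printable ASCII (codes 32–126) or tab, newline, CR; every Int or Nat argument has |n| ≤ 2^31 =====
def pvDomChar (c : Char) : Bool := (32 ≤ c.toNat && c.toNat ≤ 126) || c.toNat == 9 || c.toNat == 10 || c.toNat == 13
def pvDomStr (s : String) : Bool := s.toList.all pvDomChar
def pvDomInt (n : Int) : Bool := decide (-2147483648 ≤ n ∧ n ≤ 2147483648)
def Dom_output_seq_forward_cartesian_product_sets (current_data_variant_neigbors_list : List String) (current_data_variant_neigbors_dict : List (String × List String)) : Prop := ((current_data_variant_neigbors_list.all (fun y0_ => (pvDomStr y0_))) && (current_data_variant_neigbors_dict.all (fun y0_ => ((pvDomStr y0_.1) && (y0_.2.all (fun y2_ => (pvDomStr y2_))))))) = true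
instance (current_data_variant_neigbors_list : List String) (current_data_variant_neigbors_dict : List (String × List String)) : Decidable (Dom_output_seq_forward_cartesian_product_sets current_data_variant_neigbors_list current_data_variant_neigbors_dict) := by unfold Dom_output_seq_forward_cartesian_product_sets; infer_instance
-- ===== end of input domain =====

-- B replaces A's incremental accumulator growth by mixed-radix decoding of each
-- output index over the neighbor-set sizes (objective: alternative algorithm,
-- same asymptotic cost).

-- ===== PORT A =====
-- dct[v] : first-match lookup in the association list; a missing key raises
-- KeyError in Python, excluded by Pre_; the port uses `.getD []` there.
def output_seq_forward_cartesian_product_sets (current_data_variant_neigbors_list : List String) (current_data_variant_neigbors_dict : List (String × List String)) : List (List String) :=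
  current_data_variant_neigbors_list.foldl
    (fun products each_variant =>
      products.foldl
        (fun temp_products product =>
          ((current_data_variant_neigbors_dict.lookup each_variant).getD []).foldl
            (fun temp_products alt => temp_products ++ [product ++ [alt]])
            temp_products)
        [])
    [[]]

-- ===== PORT B =====
-- transliteration of Source B: neighbor_lists, total = product of sizes, then for
-- each i in range(total) decode digits last-variant-fastest and reverse.
-- nl[rem % len(nl)] is in range whenever the loop runs (total > 0 ⇒ every
-- len(nl) > 0), so `.getD … ""` is exact there.
def output_seq_forward_cartesian_product_sets_alt (current_data_variant_neigbors_list : List String) (current_data_variant_neigbors_dict : List (String × List String)) : List (List String) :=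
  let neighbor_lists := current_data_variant_neigbors_list.map
    (fun v => (current_data_variant_neigbors_dict.lookup v).getD [])
  let total := neighbor_lists.foldl (fun t nl => t * nl.length) 1
  (List.range total).map (fun i =>
    let st := neighbor_lists.reverse.foldl
      (fun (st : List String × Nat) nl =>
        (st.1 ++ [nl.getD (st.2 % nl.length) ""], st.2 / nl.length))
      ([], i)
    st.1.reverse)

-- ===== PRECONDITION & SPEC =====
-- Pre_ excludes inputs where some listed variant has no dict entry: there both
-- Pythons raise KeyError, except that A still returns [] when an earlier
-- variant's empty neighbor set empties the accumulator before the missing key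
-- is ever looked up — B builds all neighbor lists upfront and raises there too.
def Pre_output_seq_forward_cartesian_product_sets (current_data_variant_neigbors_list : List String) (current_data_variant_neigbors_dict : List (String × List String)) : Prop :=
  ∀ v ∈ current_data_variant_neigbors_list, (current_data_variant_neigbors_dict.lookup v).isSome = true
instance (current_data_variant_neigbors_list : List String) (current_data_variant_neigbors_dict : List (String × List String)) : Decidable (Pre_output_seq_forward_cartesian_product_sets current_data_variant_neigbors_list current_data_variant_neigbors_dict) := by unfold Pre_output_seq_forward_cartesian_product_sets; infer_instance

def pvWitness_output_seq_forward_cartesian_product_sets : List String × (List (String × List String)) :=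
  (["a", "b"], [("a", ["x", "y"]), ("b", ["u", "v"])])

def Spec_output_seq_forward_cartesian_product_sets (current_data_variant_neigbors_list : List String) (current_data_variant_neigbors_dict : List (String × List String)) (out : List (List String)) : Prop := out = output_seq_forward_cartesian_product_sets_alt current_data_variant_neigbors_list current_data_variant_neigbors_dict
instance (current_data_variant_neigbors_list : List String) (current_data_variant_neigbors_dict : List (String × List String)) (out : List (List String)) : Decidable (Spec_output_seq_forward_cartesian_product_sets current_data_variant_neigbors_list current_data_variant_neigbors_dict out) := by unfold Spec_output_seq_forward_cartesian_product_sets; infer_instance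

-- ===== CLAIM (what is proved, stated in full; the proofs are below) =====
def Claim_equal_output_seq_forward_cartesian_product_sets : Prop := ∀ (current_data_variant_neigbors_list : List String) (current_data_variant_neigbors_dict : List (String × List String)), Dom_output_seq_forward_cartesian_product_sets current_data_variant_neigbors_list current_data_variant_neigbors_dict → Pre_output_seq_forward_cartesian_product_sets current_data_variant_neigbors_list current_data_variant_neigbors_dict → Spec_output_seq_forward_cartesian_product_sets current_data_variant_neigbors_list current_data_variant_neigbors_dict (output_seq_forward_cartesian_product_sets current_data_variant_neigbors_list current_data_variant_neigbors_dict)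

-- ===== LEMMAS AND PROOFS =====

-- A's one-variant step, in flatMap form.
def pvStep (acc : List (List String)) (l : List String) : List (List String) :=
  acc.flatMap (fun p => l.map (fun a => p ++ [a]))

-- B's per-index decoding fold.
def pvDecFold (R : List (List String)) (st : List String × Nat) : List String × Nat :=
  R.foldl
    (fun (st : List String × Nat) nl =>
      (st.1 ++ [nl.getD (st.2 % nl.length) ""], st.2 / nl.length))
    st

def pvDec (N : List (List String)) (i : Nat) : List String :=
  (pvDecFold N.reverse ([], i)).1.reverse

def pvProds (N : List (List String)) : Nat :=
  N.foldl (fun t nl => t * nl.length) 1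

-- A's double inner loop equals one pvStep.
theorem pvInner_eq (l : List String) (ps : List (List String)) :
    ps.foldl
      (fun temp_products product =>
        l.foldl (fun temp_products alt => temp_products ++ [product ++ [alt]])
          temp_products)
      [] = pvStep ps l := by
  have h : (fun (temp_products : List (List String)) (product : List String) =>
      l.foldl (fun temp_products alt => temp_products ++ [product ++ [alt]])
        temp_products)
      = fun temp_products product =>
        temp_products ++ l.map (fun a => product ++ [a]) := by
    funext t p
    exact PySem.List.foldl_append_singleton_eq_map (fun alt => p ++ [alt]) l t
  rw [h, PySem.List.foldl_append_eq_flatMap]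
  simp [pvStep]

theorem pvProds_snoc (L : List (List String)) (l : List String) :
    pvProds (L ++ [l]) = pvProds L * l.length := by
  simp [pvProds, List.foldl_append]

theorem pvDecFold_split (R : List (List String)) (c : List String) (r : Nat) :
    pvDecFold R (c, r) = (c ++ (pvDecFold R ([], r)).1, (pvDecFold R ([], r)).2) := by
  induction R generalizing c r with
  | nil => simp [pvDecFold]
  | cons nl R ih =>
      simp only [pvDecFold, List.foldl_cons, List.nil_append] at *
      rw [ih (c ++ [nl.getD (r % nl.length) ""]), ih [nl.getD (r % nl.length) ""]]
      simp

theorem pvDec_snoc (L : List (List String)) (l : List String) (i : Nat) :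
    pvDec (L ++ [l]) i = pvDec L (i / l.length) ++ [l.getD (i % l.length) ""] := by
  simp only [pvDec, List.reverse_append, List.reverse_cons, List.reverse_nil,
    List.nil_append, List.cons_append]
  have h1 : pvDecFold (l :: L.reverse) ([], i)
      = pvDecFold L.reverse ([l.getD (i % l.length) ""], i / l.length) := by
    simp [pvDecFold]
  rw [h1, pvDecFold_split]
  simp

-- a map over l as a map over its index range
theorem pvMap_range_getD (l : List String) (f : String → List String) :
    (List.range l.length).map (fun j => f (l.getD j "")) = l.map f := by
  apply List.ext_getElem
  · simp
  · intro k h1 h2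
    simp only [List.getElem_map, List.getElem_range]
    have hk : k < l.length := by simpa using h1
    rw [List.getD_eq_getElem?_getD, List.getElem?_eq_getElem hk]
    simp

theorem pvRange_mul (P n : Nat) :
    List.range (P * n)
      = (List.range P).flatMap (fun q => (List.range n).map (fun j => q * n + j)) := by
  induction P with
  | zero => simp
  | succ P ih =>
      rw [Nat.succ_mul, List.range_add, ih, List.range_succ]
      simp

-- Main: B's index decoding over range(total) equals A's foldl of pvStep.
theorem pvMain (N : List (List String)) :
    (List.range (pvProds N)).map (pvDec N) = N.foldl pvStep [[]] := by
  induction N using List.reverseRecOn with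
  | nil => simp [pvProds, pvDec, pvDecFold, List.range_succ]
  | append_singleton L l ih =>
      rw [pvProds_snoc, List.foldl_append, List.foldl_cons, List.foldl_nil, ← ih]
      rw [pvRange_mul, List.map_flatMap]
      simp only [pvStep, List.flatMap_map]
      apply List.flatMap_congr
      intro q hq
      rw [List.map_map, ← pvMap_range_getD l (fun a => pvDec L q ++ [a])]
      apply List.map_congr_left
      intro j hj
      simp only [Function.comp_apply, List.mem_range] at hj ⊢
      have hn : 0 < l.length := lt_of_le_of_lt (Nat.zero_le j) hj
      have hd : (q * l.length + j) / l.length = q := by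
        rw [Nat.add_comm, Nat.add_mul_div_right _ _ hn, Nat.div_eq_of_lt hj, Nat.zero_add]
      have hm : (q * l.length + j) % l.length = j := by
        rw [Nat.add_comm, Nat.add_mul_mod_self_right, Nat.mod_eq_of_lt hj]
      rw [pvDec_snoc, hd, hm]

theorem output_seq_forward_cartesian_product_sets_spec : Claim_equal_output_seq_forward_cartesian_product_sets := by
  intro lst dct _ _
  unfold Spec_output_seq_forward_cartesian_product_sets
  unfold output_seq_forward_cartesian_product_sets output_seq_forward_cartesian_product_sets_alt
  simp only []
  rw [show ((lst.map (fun v => (dct.lookup v).getD [])).foldl (fun t nl => t * nl.length) 1)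
      = pvProds (lst.map (fun v => (dct.lookup v).getD [])) from rfl]
  rw [show (fun i => ((lst.map (fun v => (dct.lookup v).getD [])).reverse.foldl
        (fun (st : List String × Nat) nl =>
          (st.1 ++ [nl.getD (st.2 % nl.length) ""], st.2 / nl.length)) ([], i)).1.reverse)
      = pvDec (lst.map (fun v => (dct.lookup v).getD [])) from rfl]
  rw [pvMain, List.foldl_map]
  have h : (fun (products : List (List String)) (each_variant : String) =>
      products.foldl
        (fun temp_products product =>
          ((dct.lookup each_variant).getD []).foldl
            (fun temp_products alt => temp_products ++ [product ++ [alt]])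
            temp_products)
        [])
      = fun products each_variant => pvStep products ((dct.lookup each_variant).getD []) := by
    funext ps v
    exact pvInner_eq _ _
  rw [h]
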